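-- pv_equiv track=rewrite | github.com/kazikhalednur/cpc-server | accounts/helpers.py | match_email_id_digits_group
-- ===== SOURCE A (Python) =====
-- def match_email_id_digits_group(student_id, email):
--
--     student_id_digits = "".join(filter(str.isdigit, student_id))[::-1]
--     email_username = email.split("@")[0][::-1]
--
--     email_digits = "".join(filter(str.isdigit, email_username))
--
--     max_len = min(len(student_id_digits), len(email_digits))
--     match_length = 0
--
--     for i in range(max_len):
--         if student_id_digits[i] == email_digits[i]:
--             match_length += 1
--         else:
--             break
--
--     return match_length >= 3
-- ===== SOURCE B (Python) =====
-- def match_email_id_digits_group(student_id, email):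
--     d1 = "".join(ch for ch in student_id if ch.isdigit())
--     d2 = "".join(ch for ch in email.split("@")[0] if ch.isdigit())
--     return len(d1) >= 3 and len(d2) >= 3 and d1[-3:] == d2[-3:]
-- ===== Notes on version B (the rewrite author's own statement) =====
-- stated objective: simpler
-- what changed: Replaces the double reversal and the index loop that counts the common prefix of the reversed digit strings with a direct comparison of the last three digits via slicing, guarded by length checks.
import Mathlib
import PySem

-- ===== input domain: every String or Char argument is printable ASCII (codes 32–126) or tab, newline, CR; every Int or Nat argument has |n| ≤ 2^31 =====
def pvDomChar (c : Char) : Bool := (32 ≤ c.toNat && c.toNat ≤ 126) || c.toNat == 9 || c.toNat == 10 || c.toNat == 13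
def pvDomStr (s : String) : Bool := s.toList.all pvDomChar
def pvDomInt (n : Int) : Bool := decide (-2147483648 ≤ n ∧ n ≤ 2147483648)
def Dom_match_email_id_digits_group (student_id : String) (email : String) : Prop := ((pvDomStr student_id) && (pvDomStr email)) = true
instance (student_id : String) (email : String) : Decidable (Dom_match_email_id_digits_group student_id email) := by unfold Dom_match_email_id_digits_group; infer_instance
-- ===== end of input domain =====

-- B replaces A's double reversal and prefix-counting loop over the reversed digit
-- strings by a direct length-guarded comparison of the last three digits (simpler).


-- ===== PORT A =====
-- A's for-loop with break: walks both strings in parallel, counting matches until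
-- the first mismatch (the break) or the end of the shorter string (range(max_len)).
def pvMatchLoop : List Char → List Char → Nat
  | a :: as, b :: bs => if a = b then pvMatchLoop as bs + 1 else 0
  | _, _ => 0

def match_email_id_digits_group (student_id : String) (email : String) : Bool :=
  let student_id_digits := (student_id.toList.filter PySem.Chars.isdigit).reverse
  let email_username := ((PySem.Chars.splitOn email.toList ['@']).headD []).reverse
  let email_digits := email_username.filter PySem.Chars.isdigit
  decide (3 ≤ pvMatchLoop student_id_digits email_digits)

-- ===== PORT B =====
def match_email_id_digits_group_alt (student_id : String) (email : String) : Bool :=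
  let d1 := student_id.toList.filter PySem.Chars.isdigit
  let d2 := ((PySem.Chars.splitOn email.toList ['@']).headD []).filter PySem.Chars.isdigit
  decide (3 ≤ d1.length) && decide (3 ≤ d2.length) &&
    decide (PySem.List.slice d1 (some (-3)) none = PySem.List.slice d2 (some (-3)) none)

-- ===== PRECONDITION & SPEC =====
def Spec_match_email_id_digits_group (student_id : String) (email : String) (out : Bool) : Prop := out = match_email_id_digits_group_alt student_id email
instance (student_id : String) (email : String) (out : Bool) : Decidable (Spec_match_email_id_digits_group student_id email out) := by unfold Spec_match_email_id_digits_group; infer_instance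

-- ===== CLAIM (what is proved, stated in full; the proofs are below) =====
def Claim_equal_match_email_id_digits_group : Prop := ∀ (student_id : String) (email : String), Dom_match_email_id_digits_group student_id email → Spec_match_email_id_digits_group student_id email (match_email_id_digits_group student_id email)

-- ===== LEMMAS AND PROOFS =====

-- A's loop counts the longest common prefix; it reaches n iff both lists have
-- length ≥ n and their length-n prefixes agree.
theorem pvMatchLoop_ge_iff (n : Nat) : ∀ (a b : List Char),
    n ≤ pvMatchLoop a b ↔ n ≤ a.length ∧ n ≤ b.length ∧ a.take n = b.take n := by
  induction n with
  | zero => intro a b; simp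
  | succ n ih =>
    intro a b
    cases a with
    | nil => simp [pvMatchLoop]
    | cons x xs =>
      cases b with
      | nil => simp [pvMatchLoop]
      | cons y ys =>
        by_cases h : x = y
        · subst h
          simp only [pvMatchLoop, if_true, List.length_cons, List.take_succ_cons,
            Nat.succ_le_succ_iff, List.cons.injEq, true_and, ih xs ys]
        · simp [pvMatchLoop, h]

-- B's slice d[-3:] is the reverse of the first three of the reversed list.
theorem pvLast3_eq (l : List Char) :
    PySem.List.slice l (some (-3)) none = (l.reverse.take 3).reverse := by
  rw [PySem.List.slice_from_neg_ofNat l 3 (by omega), List.take_reverse, List.reverse_reverse]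

-- The two ports agree as a function of the raw id string and the email username.
theorem pvKey (s u : List Char) :
    decide (3 ≤ pvMatchLoop (s.filter PySem.Chars.isdigit).reverse
        (u.reverse.filter PySem.Chars.isdigit)) =
      (decide (3 ≤ (s.filter PySem.Chars.isdigit).length) &&
       decide (3 ≤ (u.filter PySem.Chars.isdigit).length) &&
       decide (PySem.List.slice (s.filter PySem.Chars.isdigit) (some (-3)) none =
         PySem.List.slice (u.filter PySem.Chars.isdigit) (some (-3)) none)) := by
  rw [List.filter_reverse, ← Bool.decide_and, ← Bool.decide_and]
  apply decide_eq_decide.mpr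
  rw [pvMatchLoop_ge_iff, pvLast3_eq, pvLast3_eq, List.reverse_inj]
  simp [and_assoc]

-- ===== VERDICT (by name: the statement is the Claim_ definition above) =====
theorem match_email_id_digits_group_spec : Claim_equal_match_email_id_digits_group := by
  intro sid email _
  unfold Spec_match_email_id_digits_group
  show match_email_id_digits_group sid email = match_email_id_digits_group_alt sid email
  unfold match_email_id_digits_group match_email_id_digits_group_alt
  exact pvKey sid.toList ((PySem.Chars.splitOn email.toList ['@']).headD [])
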